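-- pv_equiv track=rewrite | github.com/NishantChokkarapu/COMP9318_Project | submission.py | dict_list
-- ===== SOURCE A (Python) =====
-- def dict_list(codes):
--     enum_list = list(enumerate(codes))
--     clusters = {}
--     for index, cluster_no in enum_list:
--         if cluster_no in clusters:
--             clusters[cluster_no].append(index)
--         else:
--             clusters[cluster_no] = [index]
--
--     return clusters
-- ===== SOURCE B (Python) =====
-- def dict_list(codes):
--     # Two-pass grouping: dedup the cluster values in first-occurrence order,
--     # then collect the indices of each value with a per-key scan.
--     keys = list(dict.fromkeys(codes))
--     return {k: [i for i, c in enumerate(codes) if c == k] for k in keys}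
-- ===== Notes on version B (the rewrite author's own statement) =====
-- stated objective: alternative
-- what changed: A builds the grouping in one pass with a mutable dict of lists; B first dedups the cluster values (dict.fromkeys) and then builds the result with a per-key comprehension scanning enumerate(codes), no in-place mutation of dict values.
import Mathlib
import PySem

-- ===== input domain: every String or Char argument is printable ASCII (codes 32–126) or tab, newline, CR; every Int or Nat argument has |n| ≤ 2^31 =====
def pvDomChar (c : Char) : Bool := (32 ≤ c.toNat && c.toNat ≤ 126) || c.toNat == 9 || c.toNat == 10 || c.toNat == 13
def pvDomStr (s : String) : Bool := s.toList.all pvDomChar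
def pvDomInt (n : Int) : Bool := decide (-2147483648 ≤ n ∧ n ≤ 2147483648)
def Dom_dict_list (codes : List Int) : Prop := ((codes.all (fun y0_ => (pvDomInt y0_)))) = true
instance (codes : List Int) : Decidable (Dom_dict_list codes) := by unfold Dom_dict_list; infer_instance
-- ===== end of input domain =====

-- B groups by dedup-then-per-key-scan instead of A's single mutable-dict pass; same result, proved equal.

-- ===== PORT A =====
def dict_list (codes : List Int) : List (Int × List Int) :=
  ((PySem.List.enumerate codes).foldl
    (fun clusters p =>
      if clusters.contains p.2 then clusters.modify p.2 [] (fun v => v ++ [p.1])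
      else clusters.insert p.2 [p.1])
    PySem.Dict.empty).items

-- ===== PORT B =====
def dict_list_alt (codes : List Int) : List (Int × List Int) :=
  (PySem.List.dedup codes).map
    (fun k => (k, ((PySem.List.enumerate codes).filter (fun p => p.2 == k)).map (fun p => p.1)))

-- ===== PRECONDITION & SPEC =====
def Spec_dict_list (codes : List Int) (out : List (Int × List Int)) : Prop := out = dict_list_alt codes
instance (codes : List Int) (out : List (Int × List Int)) : Decidable (Spec_dict_list codes out) := by unfold Spec_dict_list; infer_instance

-- ===== CLAIM (what is proved, stated in full; the proofs are below) =====
def Claim_equal_dict_list : Prop := ∀ (codes : List Int), Dom_dict_list codes → Spec_dict_list codes (dict_list codes)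

-- ===== LEMMAS AND PROOFS =====

-- A's two branches are extensionally one modify: modify on an absent key is insert of f applied to the default
theorem pv_modify_of_not_contains {κ ν : Type} [BEq κ] [LawfulBEq κ] (d : PySem.Dict κ ν) (k : κ)
    (d0 : ν) (f : ν → ν) (h : d.contains k = false) : d.modify k d0 f = d.insert k (f d0) := by
  simp [PySem.Dict.modify, PySem.Dict.getD_of_not_contains, h]

theorem pv_step_eq (d : PySem.Dict Int (List Int)) (p : Int × Int) :
    (if d.contains p.2 then d.modify p.2 [] (fun v => v ++ [p.1]) else d.insert p.2 [p.1])
      = d.modify p.2 [] (fun v => v ++ [p.1]) := by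
  by_cases h : d.contains p.2 = true
  · simp [h]
  · simp only [Bool.not_eq_true] at h
    simp [h, pv_modify_of_not_contains d p.2 [] _ h]

-- keys of the grouping fold: first-occurrence set of the keys processed
theorem pv_keys_fold (l : List (Int × Int)) (d : PySem.Dict Int (List Int)) :
    (l.foldl (fun d q => d.modify q.1 [] (fun v => v ++ [q.2])) d).keys
      = PySem.Set.update d.keys (l.map Prod.fst) := by
  induction l generalizing d with
  | nil => rfl
  | cons q t ih =>
      simp only [List.foldl_cons, List.map_cons, ih]
      show _ = PySem.Set.update (PySem.Set.add d.keys q.1) (t.map Prod.fst)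
      congr 1
      rw [PySem.Dict.keys_modify]
      by_cases h : d.contains q.1 = true
      · rw [PySem.Dict.keys_insert_of_contains _ _ h]
        simp [PySem.Set.add, ← PySem.Dict.contains_iff_mem_keys, h]
      · simp only [Bool.not_eq_true] at h
        rw [PySem.Dict.keys_insert_of_not_contains _ _ h]
        simp [PySem.Set.add, ← PySem.Dict.contains_iff_mem_keys, h]

-- with nodup keys, items is keys paired with their looked-up values
theorem pv_items_eq_keys_map {κ ν : Type} [BEq κ] [LawfulBEq κ] (d : PySem.Dict κ ν)
    (hnd : d.keys.Nodup) (d0 : ν) : d.items = d.keys.map (fun k => (k, d.getD k d0)) := by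
  show d.items = (d.items.map Prod.fst).map (fun k => (k, d.getD k d0))
  rw [List.map_map]
  conv_lhs => rw [← List.map_id d.items]
  refine List.map_congr_left ?_
  intro p hp
  obtain ⟨k, v⟩ := p
  simp [PySem.Dict.getD_of_mem_items d hp hnd d0]

-- ===== VERDICT (by name: the statement is the Claim_ definition above) =====
theorem dict_list_spec : Claim_equal_dict_list := by
  intro codes _
  unfold Spec_dict_list dict_list dict_list_alt
  have hstep : (fun (d : PySem.Dict Int (List Int)) (p : Int × Int) =>
      if d.contains p.2 then d.modify p.2 [] (fun v => v ++ [p.1]) else d.insert p.2 [p.1])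
      = fun d p => d.modify p.2 [] (fun v => v ++ [p.1]) := by
    funext d p; exact pv_step_eq d p
  rw [hstep]
  set l := PySem.List.enumerate codes with hl
  have hsw : l.foldl (fun d p => d.modify p.2 [] (fun v => v ++ [p.1])) PySem.Dict.empty
      = (l.map (fun p => (p.2, p.1))).foldl (fun d q => d.modify q.1 [] (fun v => v ++ [q.2]))
          PySem.Dict.empty := by
    rw [List.foldl_map]
  rw [hsw]
  set sw := l.map (fun p : Int × Int => (p.2, p.1)) with hswdef
  set D := sw.foldl (fun d q => d.modify q.1 [] (fun v => v ++ [q.2])) PySem.Dict.empty with hD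
  have hfst : sw.map Prod.fst = codes := by
    rw [hswdef, List.map_map]
    exact PySem.List.map_snd_enumerate codes 0
  have hkeys : D.keys = PySem.Set.ofList codes := by
    rw [hD, pv_keys_fold]
    show PySem.Set.update [] (sw.map Prod.fst) = _
    rw [hfst]
    rfl
  have hnd : D.keys.Nodup := by rw [hkeys]; exact PySem.Set.nodup_ofList codes
  rw [pv_items_eq_keys_map D hnd [], hkeys, PySem.List.dedup_eq_ofList]
  refine List.map_congr_left ?_
  intro k _
  have hgetD : D.getD k [] = (sw.filter (fun q => q.1 == k)).map (fun q => q.2) := by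
    rw [hD, PySem.Dict.getD_foldl_modify_append]
    simp
  rw [hgetD, hswdef, List.filter_map, List.map_map]
  rfl
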